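-- pv_equiv track=rewrite | github.com/mrogo22/PRISM | src/pysubgroup extensions/array_target.py | has_positive_to_negative_transition
-- ===== SOURCE A (Python) =====
-- def has_positive_to_negative_transition(array):
--     """
--     Checks if the array has a transition from negative to positive values
--     without returning to negative.
--     """
--     seen_negative = False  # Tracks if we have encountered negative numbers
--     for value in array:
--         if value > 0:
--             if seen_negative:
--                 return False  # Encountered a positive number after a negative
--         elif value < 0:
--             seen_negative = True  # Start tracking negative numbers
--         else:
--             return False  # Zero is not allowed
--     # Ensure the array has at least one positive and one negative number
--     return seen_negative and array[0] > 0
-- ===== SOURCE B (Python) =====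
-- def has_positive_to_negative_transition(array):
--     idx = next((i for i, v in enumerate(array) if v < 0), None)
--     if idx is None:
--         return False
--     return idx > 0 and all(v > 0 for v in array[:idx]) and all(v < 0 for v in array[idx:])
-- ===== Notes on version B (the rewrite author's own statement) =====
-- stated objective: alternative
-- what changed: Replaces A's single-pass boolean state machine with a locate-the-first-negative-index then validate-the-two-segments decomposition (prefix all strictly positive, suffix all strictly negative).
import Mathlib
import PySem

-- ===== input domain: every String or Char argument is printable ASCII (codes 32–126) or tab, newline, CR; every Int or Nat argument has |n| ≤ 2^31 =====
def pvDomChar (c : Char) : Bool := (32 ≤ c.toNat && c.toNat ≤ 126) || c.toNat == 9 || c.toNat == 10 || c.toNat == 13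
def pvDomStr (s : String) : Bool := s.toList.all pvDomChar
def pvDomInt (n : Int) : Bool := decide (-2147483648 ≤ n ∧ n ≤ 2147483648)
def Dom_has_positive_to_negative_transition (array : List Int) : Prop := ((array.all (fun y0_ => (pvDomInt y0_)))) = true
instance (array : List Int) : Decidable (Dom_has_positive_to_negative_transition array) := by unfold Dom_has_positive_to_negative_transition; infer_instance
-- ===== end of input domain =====

-- B replaces A's boolean state machine with a find-first-negative-index then two-segment check (alternative decomposition, same cost).

-- ===== PORT A =====
-- the Python for-loop with its `seen_negative` flag and early returns; at the end
-- `seen_negative and array[0] > 0` short-circuits, so array[0] is only read when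
-- seen = true (array then nonempty); headD 0 is exact there.
def pvAGo (array : List Int) : List Int → Bool → Bool
  | [], seen => seen && decide (0 < array.headD 0)
  | v :: rest, seen =>
    if 0 < v then (if seen then false else pvAGo array rest seen)
    else if v < 0 then pvAGo array rest true
    else false

def has_positive_to_negative_transition (array : List Int) : Bool :=
  pvAGo array array false

-- ===== PORT B =====
-- next((i for i, v in enumerate(array) if v < 0), None) → findIdx?; the slices
-- array[:idx] / array[idx:] with idx ≥ 0 in range are exactly take / drop.
def has_positive_to_negative_transition_alt (array : List Int) : Bool :=
  match array.findIdx? (fun v => v < 0) with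
  | none => false
  | some i =>
    decide (0 < i) && (array.take i).all (fun v => decide (0 < v))
      && (array.drop i).all (fun v => decide (v < 0))

-- ===== PRECONDITION & SPEC =====
def Spec_has_positive_to_negative_transition (array : List Int) (out : Bool) : Prop := out = has_positive_to_negative_transition_alt array
instance (array : List Int) (out : Bool) : Decidable (Spec_has_positive_to_negative_transition array out) := by unfold Spec_has_positive_to_negative_transition; infer_instance

-- ===== CLAIM (what is proved, stated in full; the proofs are below) =====
def Claim_equal_has_positive_to_negative_transition : Prop := ∀ (array : List Int), Dom_has_positive_to_negative_transition array → Spec_has_positive_to_negative_transition array (has_positive_to_negative_transition array)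

-- ===== LEMMAS AND PROOFS =====

-- ===== VERDICT (by name: the statement is the Claim_ definition above) =====
-- once a negative has been seen, A succeeds iff the rest is all-negative and array[0] > 0
theorem pvAGo_true (array l : List Int) :
    pvAGo array l true = (l.all (fun v => decide (v < 0)) && decide (0 < array.headD 0)) := by
  induction l with
  | nil => simp [pvAGo]
  | cons v rest ih =>
    by_cases h1 : 0 < v
    · simp [pvAGo, h1, show ¬ v < 0 by omega]
    · by_cases h2 : v < 0
      · simp [pvAGo, h1, h2, ih]
      · simp [pvAGo, h1, h2]

-- the seen = false phase, characterised through the first negative index of the suffix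
theorem pvAGo_false (array l : List Int) :
    pvAGo array l false =
      (match l.findIdx? (fun v => v < 0) with
       | none => false
       | some i =>
         (l.take i).all (fun v => decide (0 < v)) && (l.drop i).all (fun v => decide (v < 0))
           && decide (0 < array.headD 0)) := by
  induction l with
  | nil => simp [pvAGo]
  | cons v rest ih =>
    by_cases h2 : v < 0
    · simp [pvAGo, show ¬ 0 < v by omega, h2, List.findIdx?_cons, pvAGo_true]
    · by_cases h1 : 0 < v
      · rw [show pvAGo array (v :: rest) false = pvAGo array rest false from by
          simp [pvAGo, h1]]
        rw [ih]
        simp only [List.findIdx?_cons, decide_eq_true_eq, h2, if_false, Option.map]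
        cases hfi : rest.findIdx? (fun v => v < 0) with
        | none => simp
        | some i => simp [h1, Bool.and_assoc]
      · have hv : v = 0 := by omega
        simp [pvAGo, hv, List.findIdx?_cons, Option.map]
        cases hfi : rest.findIdx? (fun v => v < 0) with
        | none => simp
        | some i => simp

-- ===== VERDICT' =====
theorem has_positive_to_negative_transition_spec : Claim_equal_has_positive_to_negative_transition := by
  intro array _
  unfold Spec_has_positive_to_negative_transition
  unfold has_positive_to_negative_transition has_positive_to_negative_transition_alt
  rw [pvAGo_false]
  cases array with
  | nil => simp
  | cons h t =>
    cases hfi : (h :: t).findIdx? (fun v => v < 0) with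
    | none => simp
    | some i =>
      cases i with
      | zero =>
        -- first element is negative: both sides are false
        have hneg : h < 0 := by
          by_contra hc
          rw [List.findIdx?_cons] at hfi
          simp only [hc, decide_false] at hfi
          cases hft : t.findIdx? (fun v => v < 0) <;> simp [hft] at hfi
        simp [show ¬ 0 < h by omega]
      | succ n =>
        -- first negative at position n+1 > 0: take (n+1) starts with h, so the
        -- `array[0] > 0` conjunct of A is absorbed by the all-positive prefix check
        simp only [List.take_succ_cons, List.drop_succ_cons, List.headD_cons, List.all_cons]
        by_cases hh : 0 < h <;> simp [hh, Bool.and_comm]
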